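-- pv_equiv track=rewrite | github.com/BritishPAY/PRIS-2026--MussanapAidemir-RogovaKsenia-OvcherenkoNikita---Finance- | src/main.py | assign_labels
-- ===== SOURCE A (Python) =====
-- def assign_labels(words, entities):
--     labels = ["O"] * len(words)
--
--     for i, word in enumerate(words):
--         w = word.lower()
--         for key, value in entities.items():
--             if value and w in value.lower():
--                 labels[i] = f"B-{key.upper()}"
--                 break
--
--     return labels
-- ===== SOURCE B (Python) =====
-- def assign_labels(words, entities):
--     # Transposed decomposition: entities outer, words inner; an already-set
--     # label is never overwritten, so the first entity in dict order wins,
--     # exactly as A's inner break.  value.lower(), the tag and word.lower()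
--     # are computed once each instead of once per (word, entity) pair.
--     labels = ["O"] * len(words)
--     lowered = [w.lower() for w in words]
--     for key, value in entities.items():
--         if not value:
--             continue
--         vlow = value.lower()
--         tag = "B-" + key.upper()
--         labels = [tag if lab == "O" and w in vlow else lab
--                   for lab, w in zip(labels, lowered)]
--     return labels
-- ===== Notes on version B (the rewrite author's own statement) =====
-- stated objective: alternative
-- what changed: Transposed the nested loops: B iterates entities in the outer loop and words in the inner comprehension, never overwriting an already-assigned label (so the first entity in dict order still wins), and hoists value.lower()/the tag out of the inner loop and precomputes word.lower() once per word instead of A's per-word inner entity scan with break and per-pair value.lower().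
import Mathlib
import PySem

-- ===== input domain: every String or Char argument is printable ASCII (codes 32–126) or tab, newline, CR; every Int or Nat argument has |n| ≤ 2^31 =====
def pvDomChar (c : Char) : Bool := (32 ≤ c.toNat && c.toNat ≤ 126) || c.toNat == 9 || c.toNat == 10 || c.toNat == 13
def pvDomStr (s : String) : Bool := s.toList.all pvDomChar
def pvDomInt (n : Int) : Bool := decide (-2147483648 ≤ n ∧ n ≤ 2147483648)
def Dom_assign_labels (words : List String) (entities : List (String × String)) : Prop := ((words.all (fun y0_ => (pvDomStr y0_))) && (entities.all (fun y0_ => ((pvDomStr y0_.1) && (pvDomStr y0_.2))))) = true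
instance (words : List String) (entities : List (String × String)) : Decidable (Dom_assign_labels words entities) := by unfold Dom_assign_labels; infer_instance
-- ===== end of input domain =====

-- B transposes A's nested loops (entities outer, words inner, never overwriting a set label); equivalence of the return values is proved unconditionally.

-- ===== PORT A =====
-- inner `for key, value in entities.items(): if value and w in value.lower(): … break`
def aFind (w : String) : List (String × String) → Option String
  | [] => none
  | (key, value) :: rest =>
    if value ≠ "" ∧ PySem.Str.isIn w (PySem.Str.lower value) = true then
      some ("B-" ++ PySem.Str.upper key)
    else aFind w rest

def assign_labels (words : List String) (entities : List (String × String)) : List String :=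
  (PySem.List.enumerate words 0).foldl
    (fun labels p =>
      let w := PySem.Str.lower p.2
      match aFind w entities with
      | some lab => labels.set p.1.toNat lab
      | none => labels)
    (List.replicate words.length "O")

-- ===== PORT B =====
def assign_labels_alt (words : List String) (entities : List (String × String)) : List String :=
  let lowered := words.map PySem.Str.lower
  entities.foldl
    (fun labels kv =>
      if kv.2 = "" then labels
      else
        let vlow := PySem.Str.lower kv.2
        let tag := "B-" ++ PySem.Str.upper kv.1
        (labels.zip lowered).map
          (fun q => if q.1 = "O" ∧ PySem.Str.isIn q.2 vlow = true then tag else q.1))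
    (List.replicate words.length "O")

-- ===== PRECONDITION & SPEC =====
def Spec_assign_labels (words : List String) (entities : List (String × String)) (out : List String) : Prop := out = assign_labels_alt words entities
instance (words : List String) (entities : List (String × String)) (out : List String) : Decidable (Spec_assign_labels words entities out) := by unfold Spec_assign_labels; infer_instance

-- ===== CLAIM (what is proved, stated in full; the proofs are below) =====
def Claim_equal_assign_labels : Prop := ∀ (words : List String) (entities : List (String × String)), Dom_assign_labels words entities → Spec_assign_labels words entities (assign_labels words entities)

-- ===== LEMMAS AND PROOFS =====

-- the per-word answer both programs compute
def labelOf (entities : List (String × String)) (word : String) : String :=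
  (aFind (PySem.Str.lower word) entities).getD "O"

theorem aFind_ne_O {w : String} {es : List (String × String)} {l : String}
    (h : aFind w es = some l) : l ≠ "O" := by
  induction es with
  | nil => simp [aFind] at h
  | cons kv rest ih =>
    obtain ⟨k, v⟩ := kv
    simp only [aFind] at h
    split_ifs at h with hc
    · rw [Option.some.injEq] at h
      subst h
      intro he
      have h2 := congrArg String.toList he
      simp [String.toList_append] at h2
    · exact ih h

theorem aFind_append (w : String) (es es' : List (String × String)) :
    aFind w (es ++ es') =
      match aFind w es with
      | some l => some l
      | none => aFind w es' := by
  induction es with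
  | nil => simp [aFind]
  | cons kv rest ih =>
    obtain ⟨k, v⟩ := kv
    simp only [aFind, List.cons_append]
    split_ifs with hc
    · rfl
    · exact ih

-- ---- A-side: the fold over enumerate computes the per-word map ----
theorem a_fold (entities : List (String × String)) (ws : List String) (acc : List String) :
    (PySem.List.enumerate ws (acc.length : Int)).foldl
      (fun labels p =>
        let w := PySem.Str.lower p.2
        match aFind w entities with
        | some lab => labels.set p.1.toNat lab
        | none => labels)
      (acc ++ List.replicate ws.length "O")
    = acc ++ ws.map (labelOf entities) := by
  induction ws generalizing acc with
  | nil => simp [PySem.List.enumerate_nil]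
  | cons x xs ih =>
    rw [PySem.List.enumerate_cons]
    simp only [List.foldl_cons, List.length_cons, List.replicate_succ]
    have hstep :
        (match aFind (PySem.Str.lower x) entities with
          | some lab => (acc ++ "O" :: List.replicate xs.length "O").set ((acc.length : Int)).toNat lab
          | none => acc ++ "O" :: List.replicate xs.length "O")
        = (acc ++ [labelOf entities x]) ++ List.replicate xs.length "O" := by
      cases h : aFind (PySem.Str.lower x) entities with
      | none => simp [labelOf, h]
      | some lab =>
        simp only [Int.toNat_natCast, labelOf, h, Option.getD_some]
        rw [List.set_append_right _ _ (le_refl acc.length)]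
        simp
    rw [hstep]
    have hlen : ((acc.length : Int) + 1) = (((acc ++ [labelOf entities x]).length : Nat) : Int) := by
      simp
    rw [hlen, ih (acc ++ [labelOf entities x])]
    simp

theorem a_eq_map (words : List String) (entities : List (String × String)) :
    assign_labels words entities = words.map (labelOf entities) := by
  have := a_fold entities words []
  simpa [assign_labels] using this

-- ---- B-side: one entity step extends the per-word map by one entity ----
theorem b_step (words : List String) (es : List (String × String)) (kv : String × String) :
    (if kv.2 = "" then words.map (labelOf es)
     else
       ((words.map (labelOf es)).zip (words.map PySem.Str.lower)).map
         (fun q => if q.1 = "O" ∧ PySem.Str.isIn q.2 (PySem.Str.lower kv.2) = true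
                   then "B-" ++ PySem.Str.upper kv.1 else q.1))
    = words.map (labelOf (es ++ [kv])) := by
  obtain ⟨k, v⟩ := kv
  by_cases hv : v = ""
  · subst hv
    simp only [↓reduceIte]
    apply List.map_congr_left
    intro w _
    simp [labelOf, aFind_append, aFind]
    cases aFind (PySem.Str.lower w) es <;> simp
  · rw [if_neg hv, List.zip_map', List.map_map]
    apply List.map_congr_left
    intro w _
    simp only [Function.comp]
    cases h : aFind (PySem.Str.lower w) es with
    | some lab =>
      have hne := aFind_ne_O h
      simp [labelOf, aFind_append, h, hne]
    | none =>
      simp [labelOf, aFind_append, h, aFind, hv]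
      split_ifs <;> simp

theorem b_fold (words : List String) (rest es : List (String × String)) :
    rest.foldl
      (fun labels kv =>
        if kv.2 = "" then labels
        else
          ((labels.zip (words.map PySem.Str.lower)).map
            (fun q => if q.1 = "O" ∧ PySem.Str.isIn q.2 (PySem.Str.lower kv.2) = true
                      then "B-" ++ PySem.Str.upper kv.1 else q.1)))
      (words.map (labelOf es))
    = words.map (labelOf (es ++ rest)) := by
  induction rest generalizing es with
  | nil => simp
  | cons kv r ih =>
    simp only [List.foldl_cons]
    rw [b_step words es kv, ih (es ++ [kv])]
    simp

theorem b_eq_map (words : List String) (entities : List (String × String)) :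
    assign_labels_alt words entities = words.map (labelOf entities) := by
  have h0 : List.replicate words.length "O" = words.map (labelOf ([] : List (String × String))) := by
    rw [← List.map_const' (l := words) (b := "O")]
    apply List.map_congr_left
    intro w _
    simp [labelOf, aFind]
  have h1 := b_fold words entities []
  rw [List.nil_append] at h1
  unfold assign_labels_alt
  rw [h0]
  exact h1

-- ===== VERDICT (by name: the statement is the Claim_ definition above) =====
theorem assign_labels_spec : Claim_equal_assign_labels := by
  intro words entities _
  unfold Spec_assign_labels
  rw [a_eq_map, b_eq_map]
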